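-- pv_equiv track=rewrite | github.com/ibingham28-bit/tweets_repo | lab_tweets.py | count_phrases
-- ===== SOURCE A (Python) =====
-- def count_phrases(tweets: list[dict], phrases: list[str]) -> dict[str, int]:
--     normalized = [phrase.lower() for phrase in phrases]
--     counts = {phrase: 0 for phrase in normalized}
--     for tweet in tweets:
--         text = str(tweet.get("text", "")).lower()
--         for phrase in normalized:
--             if phrase in text:
--                 counts[phrase] += 1
--     return counts
-- ===== SOURCE B (Python) =====
-- def count_phrases(tweets: list[dict], phrases: list[str]) -> dict[str, int]:
--     texts = [str(t.get("text", "")).lower() for t in tweets]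
--     mult = {}
--     for q in (p.lower() for p in phrases):
--         mult[q] = mult.get(q, 0) + 1
--     return {q: m * sum(1 for t in texts if q in t) for q, m in mult.items()}
-- ===== Notes on version B (the rewrite author's own statement) =====
-- stated objective: alternative
-- what changed: Inverted the loop nesting: instead of scanning every phrase inside every tweet and bumping a dict cell, B lowers all texts once, builds a multiplicity counter of the normalized phrases, and computes each distinct phrase's count directly as multiplicity * number-of-matching-texts.
import Mathlib
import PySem

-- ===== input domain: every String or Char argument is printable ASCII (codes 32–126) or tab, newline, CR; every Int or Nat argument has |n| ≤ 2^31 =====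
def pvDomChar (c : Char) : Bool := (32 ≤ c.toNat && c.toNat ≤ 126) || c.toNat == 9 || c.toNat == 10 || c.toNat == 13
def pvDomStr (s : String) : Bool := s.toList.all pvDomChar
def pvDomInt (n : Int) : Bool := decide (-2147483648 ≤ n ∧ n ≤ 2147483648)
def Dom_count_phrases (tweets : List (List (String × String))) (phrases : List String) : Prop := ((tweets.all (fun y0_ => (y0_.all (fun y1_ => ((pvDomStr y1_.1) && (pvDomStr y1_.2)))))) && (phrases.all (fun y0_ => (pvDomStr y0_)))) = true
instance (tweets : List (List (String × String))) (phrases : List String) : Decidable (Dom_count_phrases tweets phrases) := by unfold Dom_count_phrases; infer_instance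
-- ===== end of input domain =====

-- B inverts the loop nesting: per distinct normalized phrase, count = multiplicity * number of matching texts.

-- ===== PORT A =====
def count_phrases (tweets : List (List (String × String))) (phrases : List String) : List (String × Int) :=
  let normalized := phrases.map PySem.Str.lower
  let counts := normalized.foldl (fun d p => d.insert p (0 : Int)) PySem.Dict.empty
  let final := tweets.foldl (fun d tweet =>
    let text := PySem.Str.lower ((PySem.Dict.mk tweet).getD "text" "")
    normalized.foldl (fun d phrase =>
      if PySem.Str.isIn phrase text then d.insert phrase (d.getD phrase 0 + 1) else d) d) counts
  final.items

-- ===== PORT B =====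
def count_phrases_alt (tweets : List (List (String × String))) (phrases : List String) : List (String × Int) :=
  let texts := tweets.map (fun t => PySem.Str.lower ((PySem.Dict.mk t).getD "text" ""))
  let mult := (phrases.map PySem.Str.lower).foldl
    (fun d q => d.insert q (d.getD q 0 + 1)) (PySem.Dict.empty : PySem.Dict String Int)
  ((mult.items).foldl (fun d qm =>
      d.insert qm.1 (qm.2 * (texts.foldl (fun acc t => if PySem.Str.isIn qm.1 t then acc + 1 else acc) (0 : Int))))
    PySem.Dict.empty).items

-- ===== PRECONDITION & SPEC =====
def Spec_count_phrases (tweets : List (List (String × String))) (phrases : List String) (out : List (String × Int)) : Prop := out = count_phrases_alt tweets phrases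
instance (tweets : List (List (String × String))) (phrases : List String) (out : List (String × Int)) : Decidable (Spec_count_phrases tweets phrases out) := by unfold Spec_count_phrases; infer_instance

-- ===== CLAIM (what is proved, stated in full; the proofs are below) =====
def Claim_equal_count_phrases : Prop := ∀ (tweets : List (List (String × String))) (phrases : List String), Dom_count_phrases tweets phrases → Spec_count_phrases tweets phrases (count_phrases tweets phrases)

-- ===== LEMMAS AND PROOFS =====

-- the text of one tweet, lowered (shared by both ports)
def pvTextOf (t : List (String × String)) : String := PySem.Str.lower ((PySem.Dict.mk t).getD "text" "")

-- the number of texts containing q (B's inner sum)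
def pvTCount (q : String) (texts : List String) : Int :=
  (texts.countP (fun t => PySem.Str.isIn q t) : Int)

-- a dict in canonical form: distinct keys K, value g q at key q
def pvRep (K : List String) (g : String → Int) : PySem.Dict String Int :=
  PySem.Dict.mk (K.map (fun q => (q, g q)))

lemma pvRep_items (K : List String) (g : String → Int) :
    (pvRep K g).items = K.map (fun q => (q, g q)) := rfl

lemma pvRep_keys (K : List String) (g : String → Int) :
    (pvRep K g).keys = K := by
  simp [pvRep, PySem.Dict.keys, Function.comp_def]

lemma pvRep_getD (K : List String) (g : String → Int) (hK : K.Nodup) (q : String)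
    (hq : q ∈ K) : (pvRep K g).getD q 0 = g q := by
  apply PySem.Dict.getD_of_mem_items
  · rw [pvRep_items]
    exact List.mem_map_of_mem hq
  · rw [pvRep_keys]; exact hK

lemma pvRep_insert (K : List String) (g : String → Int) (p : String)
    (hp : p ∈ K) (v : Int) :
    (pvRep K g).insert p v = pvRep K (fun q => if q = p then v else g q) := by
  apply PySem.Dict.ext
  rw [PySem.Dict.items_insert_of_contains]
  · rw [pvRep_items, pvRep_items, List.map_map]
    apply List.map_congr_left
    intro q hq
    by_cases h : q = p <;> simp [h]
  · rw [PySem.Dict.contains_iff_mem_keys, pvRep_keys]; exact hp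

-- A's inner loop over the normalized phrases, on a canonical dict
lemma pvInner (text : String) (K : List String) (hK : K.Nodup)
    (ns : List String) (hns : ∀ p ∈ ns, p ∈ K) (g : String → Int) :
    ns.foldl (fun d phrase =>
        if PySem.Str.isIn phrase text then d.insert phrase (d.getD phrase 0 + 1) else d)
      (pvRep K g)
    = pvRep K (fun q => g q + if PySem.Str.isIn q text then (ns.count q : Int) else 0) := by
  induction ns generalizing g with
  | nil => simp [pvRep]
  | cons p ns ih =>
    have hpK : p ∈ K := hns p (List.mem_cons_self ..)
    have hns' : ∀ x ∈ ns, x ∈ K := fun x hx => hns x (List.mem_cons_of_mem _ hx)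
    simp only [List.foldl_cons]
    by_cases hin : PySem.Str.isIn p text = true
    · rw [if_pos hin, pvRep_getD K g hK p hpK, pvRep_insert K g p hpK, ih hns']
      unfold pvRep
      congr 1
      apply List.map_congr_left
      intro q hq
      by_cases hqp : q = p
      · subst hqp
        simp only [hin, Prod.mk.injEq, true_and, if_true, List.count_cons_self]
        push_cast
        ring
      · simp only [if_neg hqp, List.count_cons_of_ne (Ne.symm hqp)]
    · rw [if_neg hin, ih hns']
      unfold pvRep
      congr 1
      apply List.map_congr_left
      intro q hq
      by_cases hqp : q = p
      · subst hqp
        simp only [hin, Bool.false_eq_true, if_false, List.count_cons_self]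
      · simp only [List.count_cons_of_ne (Ne.symm hqp)]

-- A's outer loop over tweets, on a canonical dict
lemma pvOuter (K : List String) (hK : K.Nodup)
    (ns : List String) (hns : ∀ p ∈ ns, p ∈ K)
    (tws : List (List (String × String))) (g : String → Int) :
    tws.foldl (fun d tweet =>
        ns.foldl (fun d phrase =>
            if PySem.Str.isIn phrase (pvTextOf tweet) then d.insert phrase (d.getD phrase 0 + 1) else d) d)
      (pvRep K g)
    = pvRep K (fun q => g q + (ns.count q : Int) * pvTCount q (tws.map pvTextOf)) := by
  induction tws generalizing g with
  | nil => simp [pvTCount, pvRep]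
  | cons tw tws ih =>
    simp only [List.foldl_cons]
    rw [pvInner (pvTextOf tw) K hK ns hns g, ih]
    unfold pvRep
    congr 1
    apply List.map_congr_left
    intro q hq
    simp only [List.map_cons, pvTCount, List.countP_cons, Prod.mk.injEq, true_and]
    push_cast
    by_cases c : PySem.Str.isIn q (pvTextOf tw) = true
    · rw [if_pos c, if_pos c]
      ring
    · rw [if_neg c, if_neg c]
      ring

-- the initial dict {phrase: 0 for phrase in normalized} has all values 0
lemma pvInitGetD (ns : List String) (d : PySem.Dict String Int)
    (hd : ∀ q, d.getD q 0 = 0) (x : String) :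
    (ns.foldl (fun d p => d.insert p (0 : Int)) d).getD x 0 = 0 := by
  induction ns generalizing d with
  | nil => exact hd x
  | cons p ns ih =>
    simp only [List.foldl_cons]
    apply ih
    intro q
    rw [PySem.Dict.getD_insert]
    split <;> simp [hd]

lemma pvInit (ns : List String) :
    ns.foldl (fun d p => d.insert p (0 : Int)) PySem.Dict.empty
    = pvRep (PySem.Set.ofList ns) (fun _ => 0) := by
  have hnd : (ns.foldl (fun d p => d.insert p (0 : Int)) PySem.Dict.empty).keys.Nodup := by
    apply PySem.Dict.nodup_keys_foldl_insert
    exact PySem.Dict.nodup_keys_empty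
  have hkeys : (ns.foldl (fun d p => d.insert p (0 : Int)) PySem.Dict.empty).keys
      = PySem.Set.ofList ns := by
    rw [PySem.Dict.keys_foldl_insert, PySem.Dict.keys_empty, PySem.Set.update_nil_left]
  apply PySem.Dict.ext
  rw [PySem.Dict.items_eq_map_keys _ hnd 0, hkeys, pvRep_items]
  apply List.map_congr_left
  intro q hq
  simp only [Prod.mk.injEq, true_and]
  exact pvInitGetD ns PySem.Dict.empty (fun q => by simp [PySem.Dict.getD_empty]) q

-- ===== VERDICT (by name: the statement is the Claim_ definition above) =====
theorem count_phrases_spec : Claim_equal_count_phrases := by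
  intro tweets phrases _
  unfold Spec_count_phrases count_phrases count_phrases_alt
  dsimp only
  have hnd := PySem.Set.nodup_ofList (phrases.map PySem.Str.lower)
  rw [pvInit (phrases.map PySem.Str.lower)]
  simp only [show ∀ t : List (String × String),
      PySem.Str.lower ((PySem.Dict.mk t).getD "text" "") = pvTextOf t from fun _ => rfl]
  rw [pvOuter (PySem.Set.ofList (phrases.map PySem.Str.lower)) hnd
        (phrases.map PySem.Str.lower)
        (fun p hp => (PySem.Set.mem_ofList (phrases.map PySem.Str.lower) p).mpr hp)
        tweets (fun _ => 0),
      PySem.Dict.foldl_insert_getD_add_one_eq_counter,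
      PySem.Dict.items_foldl_insert_fresh _ _ _ _
        (fun a _ => PySem.Dict.contains_empty _)
        (by simpa [PySem.Dict.keys] using
          PySem.Dict.nodup_keys_counter (phrases.map PySem.Str.lower)),
      PySem.Dict.items_counter, pvRep_items, List.map_map]
  simp only [PySem.Dict.empty, List.nil_append]
  apply List.map_congr_left
  intro q hq
  simp only [Function.comp_apply, PySem.List.foldl_count_if, pvTCount, zero_add]
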